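-- pv_equiv track=rewrite | github.com/neervasa00000000/nutrithrive-website | scripts/merge-moringa-melbourne-page.py | normalize_nutri_href
-- ===== SOURCE A (Python) =====
-- NT_CANON = "https://nutrithrive.com.au/blog/growing-moringa-australia-honest-frost-pots-2026.html"
--
-- OLD_NT_URLS = (
--     "https://nutrithrive.com.au/blog/grow-moringa-tree-australia.html",
--     "https://nutrithrive.com.au/pages/blog/grow-moringa-tree-australia.html",
-- )
--
-- def normalize_nutri_href(href: str) -> str:
--     if not href:
--         return href
--     h = href.strip()
--     for old in OLD_NT_URLS:
--         if h == old:
--             return NT_CANON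
--         if h.startswith(old + "#"):
--             return NT_CANON + h[len(old) :]
--     return h
-- ===== SOURCE B (Python) =====
-- NT_CANON = "https://nutrithrive.com.au/blog/growing-moringa-australia-honest-frost-pots-2026.html"
--
-- OLD_NT_URLS = {
--     "https://nutrithrive.com.au/blog/grow-moringa-tree-australia.html",
--     "https://nutrithrive.com.au/pages/blog/grow-moringa-tree-australia.html",
-- }
--
-- def normalize_nutri_href(href: str) -> str:
--     if not href:
--         return href
--     h = href.strip()
--     base, sep, frag = h.partition("#")
--     if base in OLD_NT_URLS:
--         return NT_CANON + sep + frag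
--     return h
-- ===== Notes on version B (the rewrite author's own statement) =====
-- stated objective: simpler
-- what changed: B replaces A's loop over the old URLs with equality and startswith tests by a single str.partition at the first '#' followed by one set-membership test on the base, rebuilding the result as NT_CANON + sep + frag.
import Mathlib
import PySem

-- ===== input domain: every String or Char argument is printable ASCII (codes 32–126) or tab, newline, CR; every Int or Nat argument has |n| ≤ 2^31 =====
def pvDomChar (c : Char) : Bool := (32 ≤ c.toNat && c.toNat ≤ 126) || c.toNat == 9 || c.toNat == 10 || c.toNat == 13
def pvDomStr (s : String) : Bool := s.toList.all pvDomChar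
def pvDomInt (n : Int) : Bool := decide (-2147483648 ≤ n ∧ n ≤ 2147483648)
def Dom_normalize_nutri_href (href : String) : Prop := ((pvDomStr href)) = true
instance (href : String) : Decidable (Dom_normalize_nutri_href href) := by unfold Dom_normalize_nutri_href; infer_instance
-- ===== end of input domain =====

-- B differs from A by decomposition: it splits the stripped href once at the first '#'
-- (str.partition) and decides with a single set-membership test on the base, instead of
-- A's loop that tries equality and a startswith against each old URL in turn.

-- ===== PORT A =====
def ntCanon : List Char := "https://nutrithrive.com.au/blog/growing-moringa-australia-honest-frost-pots-2026.html".toList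

def oldNtUrls : List (List Char) :=
  ["https://nutrithrive.com.au/blog/grow-moringa-tree-australia.html".toList,
   "https://nutrithrive.com.au/pages/blog/grow-moringa-tree-australia.html".toList]

-- the 'for old in OLD_NT_URLS' loop of A, step for step
def ntLoopA (h : List Char) : List (List Char) → List Char
  | [] => h
  | old :: rest =>
      if h = old then ntCanon
      else if PySem.Chars.startswith h (old ++ ['#']) then
        ntCanon ++ PySem.Chars.slice h (some (PySem.Chars.len old)) none   -- h[len(old):]
      else ntLoopA h rest

def normalize_nutri_href (href : String) : String :=
  if href.toList = [] then href                     -- 'if not href: return href'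
  else String.ofList (ntLoopA (PySem.Chars.strip href.toList) oldNtUrls)

-- ===== PORT B =====
def oldNtUrlSet : PySem.Set (List Char) :=
  PySem.Set.ofList
    ["https://nutrithrive.com.au/blog/grow-moringa-tree-australia.html".toList,
     "https://nutrithrive.com.au/pages/blog/grow-moringa-tree-australia.html".toList]

def normalize_nutri_href_alt (href : String) : String :=
  if href.toList = [] then href                     -- 'if not href: return href'
  else
    let h := PySem.Chars.strip href.toList
    -- base, sep, frag = h.partition('#'): exact hand port for the one-char separator;
    -- sepfrag is sep + frag (empty when no '#' occurs, so NT_CANON + sep + frag = NT_CANON ++ sepfrag)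
    let base := h.takeWhile (· ≠ '#')
    let sepfrag := h.drop base.length
    if oldNtUrlSet.contains base then String.ofList (ntCanon ++ sepfrag) else String.ofList h

-- ===== PRECONDITION & SPEC =====
def Spec_normalize_nutri_href (href : String) (out : String) : Prop := out = normalize_nutri_href_alt href
instance (href : String) (out : String) : Decidable (Spec_normalize_nutri_href href out) := by unfold Spec_normalize_nutri_href; infer_instance

-- ===== CLAIM (what is proved, stated in full; the proofs are below) =====
def Claim_equal_normalize_nutri_href : Prop := ∀ (href : String), Dom_normalize_nutri_href href → Spec_normalize_nutri_href href (normalize_nutri_href href)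

-- ===== LEMMAS AND PROOFS =====

-- the remainder after the partition base is exactly what 'drop base.length' gives
theorem drop_takeWhile (p : Char → Bool) (h : List Char) :
    h.drop (h.takeWhile p).length = h.dropWhile p := by
  calc h.drop (h.takeWhile p).length
      = (h.takeWhile p ++ h.dropWhile p).drop (h.takeWhile p).length := by
        rw [List.takeWhile_append_dropWhile]
    _ = h.dropWhile p := List.drop_left

-- a nonempty dropWhile starts with an element falsifying p
theorem dropWhile_head_false (p : Char → Bool) :
    ∀ (h : List Char) (c : Char) (t : List Char), h.dropWhile p = c :: t → p c = false := by
  intro h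
  induction h with
  | nil => intro c t hct; simp at hct
  | cons x xs ih =>
      intro c t hct
      by_cases hx : p x = true
      · exact ih c t (by simpa [List.dropWhile, hx] using hct)
      · simp only [List.dropWhile, hx] at hct
        rw [Bool.not_eq_true] at hx
        cases hct
        simpa using hx

theorem base_eq_of_eq (old : List Char) (hno : ∀ c ∈ old, (c ≠ '#' : Bool)) :
    old.takeWhile (· ≠ '#') = old ∧ old.drop (old.takeWhile (· ≠ '#')).length = [] := by
  have ht : old.takeWhile (fun c => (c ≠ '#' : Bool)) = old :=
    List.takeWhile_eq_self_iff.mpr hno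
  exact ⟨ht, by rw [ht]; simp⟩

theorem base_eq_of_startswith (old h : List Char) (hno : ∀ c ∈ old, (c ≠ '#' : Bool))
    (hs : (old ++ ['#']) <+: h) :
    h.takeWhile (· ≠ '#') = old ∧ h.drop (h.takeWhile (· ≠ '#')).length ≠ [] := by
  obtain ⟨t, ht⟩ := hs
  have hh : h = old ++ '#' :: t := by simpa using ht.symm
  subst hh
  have hself : old.takeWhile (fun c => (c ≠ '#' : Bool)) = old :=
    List.takeWhile_eq_self_iff.mpr hno
  have h1 : (old ++ '#' :: t).takeWhile (fun c => (c ≠ '#' : Bool)) = old := by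
    rw [List.takeWhile_append, if_pos (by rw [hself])]
    simp [List.takeWhile]
  refine ⟨h1, ?_⟩
  rw [h1]
  simp

-- converse direction: from the partition base back to A's two tests
theorem eq_or_startswith_of_base (old h : List Char)
    (hb : h.takeWhile (· ≠ '#') = old) :
    (h.drop old.length = [] → h = old) ∧
    (h.drop old.length ≠ [] → (old ++ ['#']) <+: h) := by
  have hsplit : old ++ h.dropWhile (· ≠ '#') = h := by
    rw [← hb]; exact List.takeWhile_append_dropWhile
  have hdrop : h.drop old.length = h.dropWhile (· ≠ '#') := by
    rw [← hb, drop_takeWhile]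
  constructor
  · intro hnil
    rw [hdrop] at hnil
    rw [← hsplit, hnil]; simp
  · intro hne
    rw [hdrop] at hne
    obtain ⟨c, t, hct⟩ := List.exists_cons_of_ne_nil hne
    have hc : c = '#' := by
      have := dropWhile_head_false (fun c => (c ≠ '#' : Bool)) h c t hct
      simpa using this
    refine ⟨t, ?_⟩
    rw [← hsplit, hct, hc]
    simp

-- A's unrolled loop against a pair of '#'-free old URLs equals the partition-based test
theorem ntLoop_pair (h o1 o2 : List Char)
    (hno1 : ∀ c ∈ o1, (c ≠ '#' : Bool)) (hno2 : ∀ c ∈ o2, (c ≠ '#' : Bool)) :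
    ntLoopA h [o1, o2] =
      (if h.takeWhile (· ≠ '#') = o1 ∨ h.takeWhile (· ≠ '#') = o2 then
         ntCanon ++ h.drop (h.takeWhile (· ≠ '#')).length
       else h) := by
  have slice_eq : ∀ o : List Char,
      PySem.Chars.slice h (some (PySem.Chars.len o)) none = h.drop o.length := by
    intro o
    simp [PySem.Chars.slice_eq_listSlice, PySem.Chars.len, PySem.List.slice_from_natCast]
  simp only [ntLoopA]
  by_cases h1 : h = o1
  · rw [if_pos h1, h1]
    have hb := base_eq_of_eq o1 hno1
    rw [if_pos (Or.inl hb.1), hb.1, List.drop_length, List.append_nil]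
  · rw [if_neg h1]
    by_cases h2 : PySem.Chars.startswith h (o1 ++ ['#']) = true
    · rw [if_pos h2]
      obtain ⟨hb, _⟩ := base_eq_of_startswith o1 h hno1
        ((PySem.Chars.startswith_iff _ _).mp h2)
      rw [if_pos (Or.inl hb), hb, slice_eq]
    · rw [if_neg h2]
      have hnb1 : h.takeWhile (· ≠ '#') ≠ o1 := by
        intro hb
        obtain ⟨he, hp⟩ := eq_or_startswith_of_base o1 h hb
        by_cases hd : h.drop o1.length = []
        · exact h1 (he hd)
        · exact h2 ((PySem.Chars.startswith_iff _ _).mpr (hp hd))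
      by_cases h3 : h = o2
      · rw [if_pos h3, h3]
        have hb := base_eq_of_eq o2 hno2
        rw [if_pos (Or.inr hb.1), hb.1, List.drop_length, List.append_nil]
      · rw [if_neg h3]
        by_cases h4 : PySem.Chars.startswith h (o2 ++ ['#']) = true
        · rw [if_pos h4]
          obtain ⟨hb, _⟩ := base_eq_of_startswith o2 h hno2
            ((PySem.Chars.startswith_iff _ _).mp h4)
          rw [if_pos (Or.inr hb), hb, slice_eq]
        · rw [if_neg h4]
          have hnb2 : h.takeWhile (· ≠ '#') ≠ o2 := by
            intro hb
            obtain ⟨he, hp⟩ := eq_or_startswith_of_base o2 h hb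
            by_cases hd : h.drop o2.length = []
            · exact h3 (he hd)
            · exact h4 ((PySem.Chars.startswith_iff _ _).mpr (hp hd))
          rw [if_neg (by rintro (hc | hc) <;> [exact hnb1 hc; exact hnb2 hc])]

set_option maxRecDepth 4096 in
theorem old_url1_no_hash :
    ∀ c ∈ "https://nutrithrive.com.au/blog/grow-moringa-tree-australia.html".toList,
      (c ≠ '#' : Bool) :=
  List.all_eq_true.mp (by decide)

set_option maxRecDepth 4096 in
theorem old_url2_no_hash :
    ∀ c ∈ "https://nutrithrive.com.au/pages/blog/grow-moringa-tree-australia.html".toList,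
      (c ≠ '#' : Bool) :=
  List.all_eq_true.mp (by decide)

theorem ntLoop_eq (h : List Char) :
    ntLoopA h oldNtUrls =
      (if oldNtUrlSet.contains (h.takeWhile (· ≠ '#')) = true then
         ntCanon ++ h.drop (h.takeWhile (· ≠ '#')).length
       else h) := by
  rw [show oldNtUrls =
      ["https://nutrithrive.com.au/blog/grow-moringa-tree-australia.html".toList,
       "https://nutrithrive.com.au/pages/blog/grow-moringa-tree-australia.html".toList] from rfl]
  rw [ntLoop_pair h _ _ old_url1_no_hash old_url2_no_hash]
  have hset : oldNtUrlSet =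
      ["https://nutrithrive.com.au/blog/grow-moringa-tree-australia.html".toList,
       "https://nutrithrive.com.au/pages/blog/grow-moringa-tree-australia.html".toList] := by
    simp [oldNtUrlSet, PySem.Set.ofList, List.foldl, PySem.Set.add, PySem.Set.contains]
  rw [hset]
  simp [PySem.Set.contains, List.contains_eq_mem]

-- ===== VERDICT (by name: the statement is the Claim_ definition above) =====
theorem normalize_nutri_href_spec : Claim_equal_normalize_nutri_href := by
  intro href _
  unfold Spec_normalize_nutri_href normalize_nutri_href normalize_nutri_href_alt
  by_cases hemp : href.toList = []
  · simp [hemp]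
  · simp only [hemp, ite_false]
    rw [ntLoop_eq (PySem.Chars.strip href.toList), apply_ite String.ofList]
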